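-- pv_equiv track=rewrite | github.com/tormach/example_robot_programs | trpl_examples/projects/drawing_perlin_noise_generated_paths/lightningMesh-ROBO_DIVCO.py | divco
-- ===== SOURCE A (Python) =====
-- NUM_BATCH_LENGTH = 3
--
-- def divco(list):
--     if len(list) <= NUM_BATCH_LENGTH:
--         return [list]
--     else:
--         mid = len(list) // 2
--         left = list[:mid]
--         right = list[mid:]
--         return divco(left) + divco(right)
-- ===== SOURCE B (Python) =====
-- NUM_BATCH_LENGTH = 3
--
-- def divco(list):
--     out = []
--     stack = [(0, len(list))]
--     while stack:
--         s, e = stack.pop()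
--         if e - s <= NUM_BATCH_LENGTH:
--             out.append(list[s:e])
--         else:
--             m = s + (e - s) // 2
--             stack.append((m, e))
--             stack.append((s, m))
--     return out
-- ===== Notes on version B (the rewrite author's own statement) =====
-- stated objective: alternative
-- what changed: replaces the recursive halving (which re-slices and concatenates sublists at every level) with one iterative pass over an explicit interval stack that slices each final chunk of the original list exactly once
import Mathlib
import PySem

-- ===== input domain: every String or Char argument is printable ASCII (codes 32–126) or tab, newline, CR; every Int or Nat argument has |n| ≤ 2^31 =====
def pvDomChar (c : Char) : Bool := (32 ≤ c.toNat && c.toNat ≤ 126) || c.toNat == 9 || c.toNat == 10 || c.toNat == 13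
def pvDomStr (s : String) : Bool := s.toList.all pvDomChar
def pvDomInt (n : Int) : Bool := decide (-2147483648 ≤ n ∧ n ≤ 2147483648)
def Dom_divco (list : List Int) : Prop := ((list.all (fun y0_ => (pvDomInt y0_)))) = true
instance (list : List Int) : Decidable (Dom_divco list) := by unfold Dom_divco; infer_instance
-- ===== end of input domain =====

-- B replaces A's recursive halving by one iterative pass over an explicit interval
-- stack, slicing each final chunk of the original list exactly once (objective: alternative).

-- ===== PORT A =====
-- list[:mid] / list[mid:] with 0 ≤ mid ≤ len are exactly take/drop.
def divco (list : List Int) : List (List Int) :=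
  if list.length ≤ 3 then [list]
  else
    let mid := list.length / 2
    divco (list.take mid) ++ divco (list.drop mid)
termination_by list.length
decreasing_by
  · simp only [List.length_take]; omega
  · simp only [List.length_drop]; omega

-- ===== PORT B =====
-- size of A's recursion tree on a chunk of length k; used only as the loop's termination measure
def divcoNodes (k : Nat) : Nat :=
  if k ≤ 3 then 1 else 1 + divcoNodes (k / 2) + divcoNodes (k - k / 2)
termination_by k
decreasing_by all_goals omega

theorem divcoNodes_pos (k : Nat) : 0 < divcoNodes k := by
  unfold divcoNodes; split <;> omega

-- the while-loop of Source B: pop an interval; emit its slice if small, else push its halves.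
-- list[s:e] with 0 ≤ s ≤ e ≤ len is exactly (drop s).take (e-s); indices stay Nat here.
def divcoLoop (list : List Int) : List (Nat × Nat) → List (List Int) → List (List Int)
  | [], out => out.reverse
  | (s, e) :: stack, out =>
    if e - s ≤ 3 then
      divcoLoop list stack (((list.drop s).take (e - s)) :: out)
    else
      let m := s + (e - s) / 2
      divcoLoop list ((s, m) :: (m, e) :: stack) out
termination_by stack _ => (stack.map (fun p => divcoNodes (p.2 - p.1))).sum
decreasing_by
  · have := divcoNodes_pos (e - s); simp; omega
  · simp only [List.map_cons, List.sum_cons]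
    have h1 : e - (s + (e - s) / 2) = (e - s) - (e - s) / 2 := by omega
    have h2 : s + (e - s) / 2 - s = (e - s) / 2 := by omega
    rw [h1, h2]
    conv_rhs => rw [divcoNodes]
    split
    · omega
    · omega

def divco_alt (list : List Int) : List (List Int) :=
  divcoLoop list [(0, list.length)] []

-- ===== PRECONDITION & SPEC =====
def Spec_divco (list : List Int) (out : List (List Int)) : Prop := out = divco_alt list
instance (list : List Int) (out : List (List Int)) : Decidable (Spec_divco list out) := by unfold Spec_divco; infer_instance

-- ===== CLAIM (what is proved, stated in full; the proofs are below) =====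
def Claim_equal_divco : Prop := ∀ (list : List Int), Dom_divco list → Spec_divco list (divco list)

-- ===== LEMMAS AND PROOFS =====

-- processing one interval (s,e) with s ≤ e ≤ len prepends (divco of that slice).reverse
theorem divcoLoop_spec (list : List Int) (k : Nat) :
    ∀ (s e : Nat), e - s = k → s ≤ e → e ≤ list.length →
    ∀ (stack : List (Nat × Nat)) (out : List (List Int)),
      divcoLoop list ((s, e) :: stack) out =
      divcoLoop list stack ((divco ((list.drop s).take (e - s))).reverse ++ out) := by
  induction k using Nat.strong_induction_on with
  | _ k ih =>
    intro s e hk hse hel stack out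
    have hlen : ((list.drop s).take (e - s)).length = e - s := by
      simp [List.length_take, List.length_drop]; omega
    by_cases h3 : e - s ≤ 3
    · rw [divcoLoop, if_pos h3, divco, if_pos (by rw [hlen]; exact h3)]
      simp
    · rw [divcoLoop, if_neg h3]
      have hm : s + (e - s) / 2 ≤ e := by omega
      have hL : e - s = k := hk
      -- left half
      rw [ih ((e - s) / 2) (by omega) s (s + (e - s) / 2) (by omega) (by omega) (by omega)]
      -- right half
      rw [ih ((e - s) - (e - s) / 2) (by omega) (s + (e - s) / 2) e (by omega) hm hel]
      -- identify the two slices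
      have hseg1 : (list.drop s).take (s + (e - s) / 2 - s) =
          ((list.drop s).take (e - s)).take ((e - s) / 2) := by
        rw [List.take_take]
        congr 1; omega
      have hseg2 : (list.drop (s + (e - s) / 2)).take (e - (s + (e - s) / 2)) =
          ((list.drop s).take (e - s)).drop ((e - s) / 2) := by
        rw [List.drop_take, List.drop_drop]
        congr 1
        omega
      rw [hseg1, hseg2]
      conv_rhs => rw [divco, if_neg (by rw [hlen]; exact h3), hlen]
      simp

-- ===== VERDICT (by name: the statement is the Claim_ definition above) =====
theorem divco_spec : Claim_equal_divco := by
  intro list _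
  unfold Spec_divco divco_alt
  rw [divcoLoop_spec list list.length 0 list.length (by omega) (by omega) (le_refl _) [] []]
  rw [divcoLoop]
  simp
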